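-- pv_equiv track=rewrite | github.com/AWAlexWeber/python-practice | Other/Daily/MinDeletionsToObtainStringInRightFormat.py | solution
-- ===== SOURCE A (Python) =====
-- def solution(S: str) -> int:
--     temporaryBCount = currentBCount = 0
--     for c in S:
--         if c == 'B':
--             temporaryBCount += 1
--         elif c == 'A':
--             currentBCount = temporaryBCount
--
--     temporaryACount = currentACount = 0
--     for c in S[::-1]:
--         if c == 'A':
--             temporaryACount += 1
--         elif c == 'B':
--             currentACount = temporaryACount
--
--     return min(currentACount, currentBCount)
-- ===== SOURCE B (Python) =====
-- def _count_after_first(s, first, target):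
--     i = s.find(first)
--     return s[i + 1:].count(target) if i != -1 else 0
--
--
-- def solution(S: str) -> int:
--     return min(_count_after_first(S, 'B', 'A'),
--                _count_after_first(S[::-1], 'A', 'B'))
-- ===== Notes on version B (the rewrite author's own statement) =====
-- stated objective: simpler
-- what changed: Replaces the two stateful character-by-character scans with boundary lookups: find the first occurrence of one letter (in the string, and in its reverse) and count the other letter in the remaining suffix.
import Mathlib
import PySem

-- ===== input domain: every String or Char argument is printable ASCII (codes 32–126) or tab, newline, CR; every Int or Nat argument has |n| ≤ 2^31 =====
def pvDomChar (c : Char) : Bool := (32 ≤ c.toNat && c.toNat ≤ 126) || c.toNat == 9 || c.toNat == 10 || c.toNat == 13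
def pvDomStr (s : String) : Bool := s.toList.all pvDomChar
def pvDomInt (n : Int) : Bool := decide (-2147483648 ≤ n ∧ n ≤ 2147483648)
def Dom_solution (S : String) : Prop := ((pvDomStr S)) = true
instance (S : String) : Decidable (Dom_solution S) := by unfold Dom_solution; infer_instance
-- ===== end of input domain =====

-- B finds the split points first (first 'B'; first 'A' of the reversed string) and counts one side,
-- instead of A's two stateful scans: simpler decomposition, same O(n) cost.

-- ===== PORT A =====
def solution (S : String) : Int :=
  -- first loop: temporaryBCount/currentBCount over S
  let p := S.toList.foldl (fun (st : Int × Int) c =>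
      if c == 'B' then (st.1 + 1, st.2)
      else if c == 'A' then (st.1, st.1) else st) (0, 0)
  -- second loop: temporaryACount/currentACount over S[::-1]
  let rev := (PySem.List.slice? S.toList none none (-1)).getD []
  let q := rev.foldl (fun (st : Int × Int) c =>
      if c == 'A' then (st.1 + 1, st.2)
      else if c == 'B' then (st.1, st.1) else st) (0, 0)
  min q.2 p.2

-- ===== PORT B =====
-- Source B's helper _count_after_first(s, first, target)
def countAfterFirst (s : List Char) (first target : Char) : Int :=
  let i := PySem.Chars.find s [first]
  if i ≠ -1 then (PySem.Chars.count (PySem.List.slice s (some (i + 1)) none) [target] : Int)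
  else 0

def solution_alt (S : String) : Int :=
  let rev := (PySem.List.slice? S.toList none none (-1)).getD []
  min (countAfterFirst S.toList 'B' 'A') (countAfterFirst rev 'A' 'B')

-- ===== PRECONDITION & SPEC =====
def Spec_solution (S : String) (out : Int) : Prop := out = solution_alt S
instance (S : String) (out : Int) : Decidable (Spec_solution S out) := by unfold Spec_solution; infer_instance

-- ===== CLAIM (what is proved, stated in full; the proofs are below) =====
def Claim_equal_solution : Prop := ∀ (S : String), Dom_solution S → Spec_solution S (solution S)

-- ===== LEMMAS AND PROOFS =====

-- number of x's strictly before the LAST y (0 if no y): what A's forward loop records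
def gcnt (x y : Char) : List Char → Nat
  | [] => 0
  | a :: l => if y ∈ l then (if a = x then 1 else 0) + gcnt x y l else 0

-- number of x's strictly after the FIRST y (0 if no y): what B's find-then-count computes
def hcnt (x y : Char) : List Char → Nat
  | [] => 0
  | b :: m => if b = y then m.count x else hcnt x y m

theorem gcnt_of_not_mem (x y : Char) (l : List Char) (h : y ∉ l) : gcnt x y l = 0 := by
  cases l with
  | nil => rfl
  | cons a l =>
    simp [List.mem_cons, not_or] at h
    simp [gcnt, h.2]

-- A's loop body, characterized
theorem fold_snd (x y : Char) (hxy : x ≠ y) :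
    ∀ (l : List Char) (t c : Int),
      (l.foldl (fun (st : Int × Int) ch =>
        if ch == x then (st.1 + 1, st.2)
        else if ch == y then (st.1, st.1) else st) (t, c)).2
      = if y ∈ l then t + (gcnt x y l : Int) else c := by
  intro l
  induction l with
  | nil => intro t c; simp
  | cons a l ih =>
    intro t c
    by_cases hax : a = x
    · have hb1 : (a == x) = true := by simp [hax]
      have hmem : (y ∈ a :: l) ↔ (y ∈ l) := by
        simp [List.mem_cons, hax, Ne.symm hxy]
      simp only [List.foldl_cons, hb1, if_true]
      rw [ih]
      simp only [hmem]
      by_cases hy : y ∈ l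
      · simp only [gcnt, hy, if_true, hax, Nat.cast_add]
        push_cast
        ring
      · simp [hy]
    · by_cases hay : a = y
      · have hb1 : (a == x) = false := by simp [hax]
        have hb2 : (a == y) = true := by simp [hay]
        simp only [List.foldl_cons, hb1, Bool.false_eq_true, if_false, hb2, if_true]
        rw [ih]
        have hmem : y ∈ a :: l := by simp [hay]
        simp only [hmem, if_true, gcnt, hay]
        by_cases hy : y ∈ l
        · simp [hy, hax, Ne.symm hxy]
        · simp [hy]
      · have hb1 : (a == x) = false := by simp [hax]
        have hb2 : (a == y) = false := by simp [hay]
        have hmem : (y ∈ a :: l) ↔ (y ∈ l) := by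
          simp [List.mem_cons, Ne.symm hay]
        simp only [List.foldl_cons, hb1, hb2, Bool.false_eq_true, if_false]
        rw [ih]
        simp only [hmem]
        by_cases hy : y ∈ l
        · simp only [gcnt, hy, if_true, hax, if_false]
          push_cast
          ring
        · simp [hy]

-- find.go for a one-character needle shifts its accumulator
theorem go_shift (y : Char) :
    ∀ (m : List Char) (k : Nat),
      PySem.Chars.find.go [y] m (k + 1)
      = if PySem.Chars.find.go [y] m k = -1 then -1 else PySem.Chars.find.go [y] m k + 1 := by
  intro m
  induction m with
  | nil => intro k; simp [PySem.Chars.find.go]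
  | cons c m ih =>
    intro k
    by_cases h : [y].isPrefixOf (c :: m) = true
    · have hk : ((k : Int)) ≠ -1 := by omega
      have hk1 : ((k + 1 : Nat) : Int) = (k : Int) + 1 := by omega
      simp [PySem.Chars.find.go, h, hk, hk1]
    · simp only [PySem.Chars.find.go] at *
      simp [h, ih (k + 1)]

-- count for a one-character needle is List.count
theorem count_go_singleton (x : Char) :
    ∀ (fuel : Nat) (m : List Char) (acc : Nat), m.length ≤ fuel →
      PySem.Chars.count.go [x] fuel m acc = acc + m.count x := by
  intro fuel
  induction fuel with
  | zero =>
    intro m acc h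
    have : m = [] := by cases m <;> simp_all
    subst this; simp [PySem.Chars.count.go]
  | succ n ih =>
    intro m acc h
    cases m with
    | nil => simp [PySem.Chars.count.go]
    | cons c m =>
      by_cases hc : c = x
      · subst hc
        have hp : [c].isPrefixOf (c :: m) = true := by simp [List.isPrefixOf]
        simp only [PySem.Chars.count.go, hp, if_true, List.length_cons, List.drop_succ_cons,
          List.length_nil, List.drop_zero]
        rw [ih m (acc + 1) (by simpa using Nat.le_of_succ_le_succ h)]
        simp [List.count_cons]
        omega
      · have hxc : (x == c) = false := beq_eq_false_iff_ne.mpr (Ne.symm hc)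
        have hp : [x].isPrefixOf (c :: m) = false := by simp [List.isPrefixOf, hxc]
        simp only [PySem.Chars.count.go, hp, Bool.false_eq_true, if_false]
        rw [ih m acc (by simpa using Nat.le_of_succ_le_succ h)]
        simp [List.count_cons, hc]

theorem count_singleton (x : Char) (m : List Char) :
    PySem.Chars.count m [x] = m.count x := by
  simp [PySem.Chars.count, count_go_singleton x m.length m 0 le_rfl]

-- B's helper, characterized
theorem countAfterFirst_eq_hcnt (x y : Char) :
    ∀ (l : List Char), countAfterFirst l y x = hcnt x y l := by
  intro l
  induction l with
  | nil => simp [countAfterFirst, hcnt, PySem.Chars.find, PySem.Chars.find.go]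
  | cons b m ih =>
    by_cases hb : b = y
    · subst hb
      have hp : [b].isPrefixOf (b :: m) = true := by simp [List.isPrefixOf]
      have hfind : PySem.Chars.find (b :: m) [b] = 0 := by
        simp [PySem.Chars.find, PySem.Chars.find.go, hp]
      have h01 : (0 : Int) + 1 = 1 := by norm_num
      simp [countAfterFirst, hfind, h01, PySem.List.slice_from_one, count_singleton, hcnt]
    · have hp : [y].isPrefixOf (b :: m) = false := by simp [List.isPrefixOf, Ne.symm hb]
      have hfind : PySem.Chars.find (b :: m) [y]
          = if PySem.Chars.find m [y] = -1 then -1 else PySem.Chars.find m [y] + 1 := by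
        simp only [PySem.Chars.find, PySem.Chars.find.go, hp, Bool.false_eq_true, if_false]
        exact go_shift y m 0
      by_cases hnone : PySem.Chars.find m [y] = -1
      · have : countAfterFirst m y x = 0 := by
          simp [countAfterFirst, hnone]
        simp [countAfterFirst, hfind, hnone, hcnt, hb, ← ih, this]
      · have hge : 0 ≤ PySem.Chars.find m [y] := by
          have := PySem.Chars.neg_one_le_find m [y]
          omega
        have hslice : PySem.List.slice (b :: m) (some (PySem.Chars.find m [y] + 1 + 1)) none
            = PySem.List.slice m (some (PySem.Chars.find m [y] + 1)) none := by
          rw [PySem.List.slice_from _ (by omega), PySem.List.slice_from _ (by omega)]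
          have h1 : (PySem.Chars.find m [y] + 1 + 1).toNat
              = (PySem.Chars.find m [y] + 1).toNat + 1 := by omega
          rw [h1]
          try rw [List.drop_succ_cons]
        have hne : ¬ (PySem.Chars.find m [y] + 1 = -1) := by omega
        have hstep : countAfterFirst (b :: m) y x = countAfterFirst m y x := by
          simp only [countAfterFirst, hfind, hnone, if_false, ne_eq, hne, not_false_eq_true,
            if_true, hslice]
          try simp [hnone]
        rw [hstep, ih]
        simp [hcnt, hb]
      
-- counting after the first y in the reverse = counting before the last y
theorem hcnt_append_singleton (x y : Char) :
    ∀ (m : List Char) (a : Char),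
      hcnt x y (m ++ [a]) = if y ∈ m then hcnt x y m + (if a = x then 1 else 0) else 0 := by
  intro m
  induction m with
  | nil => intro a; by_cases h : a = y <;> simp [hcnt, h]
  | cons b m ih =>
    intro a
    by_cases hb : b = y
    · subst hb
      simp [hcnt, List.count_append, List.count_singleton, List.count_cons]
    · simp [hcnt, hb, ih a, List.mem_cons, Ne.symm hb]

theorem hcnt_reverse (x y : Char) :
    ∀ (l : List Char), hcnt x y l.reverse = gcnt x y l := by
  intro l
  induction l with
  | nil => rfl
  | cons a l ih =>
    rw [List.reverse_cons, hcnt_append_singleton, ih]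
    simp only [List.mem_reverse, gcnt]
    by_cases hy : y ∈ l <;> simp [hy] <;> omega

-- ===== VERDICT (by name: the statement is the Claim_ definition above) =====
theorem solution_spec : Claim_equal_solution := by
  intro S _
  unfold Spec_solution solution solution_alt
  simp only [PySem.List.slice?_none_none_neg_one, Option.getD_some]
  rw [fold_snd 'B' 'A' (by decide), fold_snd 'A' 'B' (by decide)]
  rw [countAfterFirst_eq_hcnt 'A' 'B' S.toList,
      countAfterFirst_eq_hcnt 'B' 'A' S.toList.reverse]
  rw [hcnt_reverse 'B' 'A' S.toList]
  have h1 : hcnt 'A' 'B' S.toList = gcnt 'A' 'B' S.toList.reverse := by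
    rw [← hcnt_reverse 'A' 'B' S.toList.reverse, List.reverse_reverse]
  rw [h1]
  by_cases hA : 'A' ∈ S.toList <;> by_cases hB : 'B' ∈ S.toList.reverse <;>
    simp [hA, hB, gcnt_of_not_mem] at *
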